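-- pv_equiv track=rewrite | github.com/bartonicek/python-aoc2024 | day23b.py | connected_neighbours
-- ===== SOURCE A (Python) =====
-- from typing import Dict, Set
--
-- def connected_neighbours(graph: Dict[str, Set[str]], conn: str):
--     candidates = list(graph[conn])
--     exclude_dict: Dict[str, Set[str]] = {}
--
--     for i in range(0, len(candidates)):
--         exclude_dict[candidates[i]] = set()
--         for j in range(0, len(candidates)):
--             if i == j: continue
--             if candidates[j] in graph[candidates[i]]: continue
--             exclude_dict[candidates[i]].add(candidates[j])
--
--     max_len = 0
--     for v in exclude_dict.values(): max_len = max(max_len, len(v))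
--
--     result = graph[conn].copy()
--
--     for k, v in exclude_dict.items():
--         if (len(v) == max_len):
--             result.discard(k)
--             continue
--         result = result.difference(v)
--
--     result.add(conn)
--     return result
-- ===== SOURCE B (Python) =====
-- def connected_neighbours(graph, conn):
--     cands = list(graph[conn])
--     pairs = [(c, len([x for x in cands if x != c and x not in graph[c]])) for c in cands]
--     m = max((s for _, s in pairs), default=0)
--     low = [c for c, s in pairs if s < m]
--     keep = [x for x in low if all(x in graph[c] for c in low if c != x)]
--     return set(keep) | {conn}
-- ===== Notes on version B (the rewrite author's own statement) =====
-- stated objective: simpler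
-- what changed: B drops A's exclusion-set dictionary and result-set mutation: it counts non-adjacent other neighbours per candidate, keeps the candidates with a non-maximal count, and selects those adjacent to every other kept candidate via a survival predicate.
import Mathlib
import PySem

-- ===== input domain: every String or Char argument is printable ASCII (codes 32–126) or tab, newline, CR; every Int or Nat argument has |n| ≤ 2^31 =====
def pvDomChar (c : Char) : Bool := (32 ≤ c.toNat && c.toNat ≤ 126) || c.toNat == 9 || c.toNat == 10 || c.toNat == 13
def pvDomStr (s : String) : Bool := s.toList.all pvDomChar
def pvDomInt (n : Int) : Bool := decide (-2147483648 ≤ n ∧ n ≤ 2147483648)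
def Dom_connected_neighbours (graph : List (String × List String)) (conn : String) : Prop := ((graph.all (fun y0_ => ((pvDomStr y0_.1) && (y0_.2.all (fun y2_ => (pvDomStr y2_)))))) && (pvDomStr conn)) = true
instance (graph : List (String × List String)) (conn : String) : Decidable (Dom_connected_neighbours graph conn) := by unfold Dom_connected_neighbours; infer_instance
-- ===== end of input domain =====

-- B replaces A's build-exclusion-sets-then-mutate-result strategy by a per-neighbour
-- survival predicate over the non-maximal candidates (objective: simpler; same output set).

-- graph[c] (lookup in dict(graph), built with Python's last-wins overwrite semantics)
def cnAdj (graph : List (String × List String)) (c : String) : List String :=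
  ((PySem.Dict.ofList graph).get? c).getD []

-- ===== PORT A =====
def connected_neighbours (graph : List (String × List String)) (conn : String) : List String :=
  let candidates : List String := PySem.Set.ofList (cnAdj graph conn)
  let exclude_dict : PySem.Dict String (PySem.Set String) :=
    (PySem.List.enumerate candidates).foldl
      (fun d p =>
        d.insert p.2
          ((PySem.List.enumerate candidates).foldl
            (fun s q =>
              if p.1 = q.1 then s
              else if q.2 ∈ cnAdj graph p.2 then s
              else s.add q.2)
            PySem.Set.empty))
      PySem.Dict.empty
  let max_len : Nat := exclude_dict.values.foldl (fun m v => max m v.length) 0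
  let result : PySem.Set String :=
    exclude_dict.items.foldl
      (fun r kv => if kv.2.length = max_len then r.discard kv.1 else r.diff kv.2)
      (PySem.Set.ofList (cnAdj graph conn))
  result.add conn

-- ===== PORT B =====
def connected_neighbours_alt (graph : List (String × List String)) (conn : String) : List String :=
  let cands : List String := PySem.Set.ofList (cnAdj graph conn)
  let pairs : List (String × Nat) :=
    cands.map (fun c => (c, (cands.filter (fun x => x ≠ c ∧ x ∉ cnAdj graph c)).length))
  let m : Nat := (pairs.map (fun p => p.2)).foldl max 0
  let low : List String := (pairs.filter (fun p => p.2 < m)).map (fun p => p.1)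
  let keep : List String :=
    low.filter (fun x => (low.filter (fun c => c ≠ x)).all (fun c => x ∈ cnAdj graph c))
  PySem.Set.union (PySem.Set.ofList keep) [conn]

-- ===== PRECONDITION & SPEC =====
-- A raises KeyError when conn is not a key of graph, or when conn has at least two distinct
-- neighbours and some neighbour is not a key; exactly those inputs are excluded (B raises there too).
def Pre_connected_neighbours (graph : List (String × List String)) (conn : String) : Prop :=
  ((PySem.Dict.ofList graph).get? conn).isSome = true ∧
  ((PySem.Set.ofList (((PySem.Dict.ofList graph).get? conn).getD [])).length ≤ 1 ∨
    ∀ c ∈ (((PySem.Dict.ofList graph).get? conn).getD []),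
      ((PySem.Dict.ofList graph).get? c).isSome = true)
instance (graph : List (String × List String)) (conn : String) : Decidable (Pre_connected_neighbours graph conn) := by unfold Pre_connected_neighbours; infer_instance
def pvWitness_connected_neighbours : (List (String × List String)) × String :=
  ([("a", ["b", "c"]), ("b", ["a"]), ("c", ["a"])], "a")

def Spec_connected_neighbours (graph : List (String × List String)) (conn : String) (out : List String) : Prop := out = connected_neighbours_alt graph conn
instance (graph : List (String × List String)) (conn : String) (out : List String) : Decidable (Spec_connected_neighbours graph conn out) := by unfold Spec_connected_neighbours; infer_instance

-- ===== CLAIM (what is proved, stated in full; the proofs are below) =====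
def Claim_equal_connected_neighbours : Prop := ∀ (graph : List (String × List String)) (conn : String), Dom_connected_neighbours graph conn → Pre_connected_neighbours graph conn → Spec_connected_neighbours graph conn (connected_neighbours graph conn)

-- ===== LEMMAS AND PROOFS =====

-- the exclusion set A builds for candidate c, as a list (also B's per-candidate count base)
def cnExcl (graph : List (String × List String)) (cs : List String) (c : String) : List String :=
  cs.filter (fun x => x ≠ c ∧ x ∉ cnAdj graph c)

-- the inner j-loop of A, generalized over the remaining enumerate suffix and accumulator
theorem cn_inner_gen (A : List String) (i : Int) (ci : String) :
    ∀ (l : List (Int × String)) (acc : List String),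
      (l.map Prod.snd).Nodup → (∀ q ∈ l, q.2 ∉ acc) → (∀ q ∈ l, (i = q.1 ↔ q.2 = ci)) →
      l.foldl (fun s q => if i = q.1 then s else if q.2 ∈ A then s else PySem.Set.add s q.2) acc
        = acc ++ (l.map Prod.snd).filter (fun x => x ≠ ci ∧ x ∉ A)
  | [], acc, _, _, _ => by simp
  | q :: t, acc, hnd, hacc, hiff => by
    simp only [List.map_cons, List.nodup_cons] at hnd
    by_cases h1 : i = q.1
    · have h2 : q.2 = ci := (hiff q (by simp)).1 h1
      simp only [List.foldl_cons, if_pos h1, List.map_cons, List.filter_cons, h2]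
      have hdec : (decide (ci ≠ ci ∧ ci ∉ A)) = false := by simp
      rw [hdec]
      simp only [Bool.false_eq_true, if_false]
      exact cn_inner_gen A i ci t acc hnd.2 (fun p hp => hacc p (by simp [hp]))
        (fun p hp => hiff p (by simp [hp]))
    · have h2 : q.2 ≠ ci := fun h => h1 ((hiff q (by simp)).2 h)
      by_cases h3 : q.2 ∈ A
      · simp only [List.foldl_cons, if_neg h1, if_pos h3, List.map_cons, List.filter_cons]
        have hdec : (decide (q.2 ≠ ci ∧ q.2 ∉ A)) = false := by simp [h3]
        rw [hdec]
        simp only [Bool.false_eq_true, if_false]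
        exact cn_inner_gen A i ci t acc hnd.2 (fun p hp => hacc p (by simp [hp]))
          (fun p hp => hiff p (by simp [hp]))
      · have hq2 : q.2 ∉ acc := hacc q (by simp)
        have hadd : PySem.Set.add acc q.2 = acc ++ [q.2] := by
          simp [PySem.Set.add, hq2]
        simp only [List.foldl_cons, if_neg h1, if_neg h3, hadd, List.map_cons, List.filter_cons]
        have hdec : (decide (q.2 ≠ ci ∧ q.2 ∉ A)) = true := by simp [h2, h3]
        rw [hdec]
        simp only [if_true]
        rw [cn_inner_gen A i ci t (acc ++ [q.2])
          hnd.2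
          (fun p hp => by
            simp only [List.mem_append, List.mem_singleton]
            rintro (h | h)
            · exact hacc p (by simp [hp]) h
            · exact hnd.1 (h ▸ List.mem_map_of_mem hp))
          (fun p hp => hiff p (by simp [hp]))]
        simp

-- the inner loop computes exactly cnExcl
theorem cn_inner_eq (graph : List (String × List String)) (cs : List String) (hnd : cs.Nodup)
    (i : Int) (ci : String) (hmem : (i, ci) ∈ PySem.List.enumerate cs 0) :
    (PySem.List.enumerate cs 0).foldl
      (fun s q => if i = q.1 then s else if q.2 ∈ cnAdj graph ci then s else PySem.Set.add s q.2)
      PySem.Set.empty = cnExcl graph cs ci := by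
  obtain ⟨k, hk, hp⟩ := (PySem.List.mem_enumerate_iff cs 0 (i, ci)).1 hmem
  have hi : i = (k : Int) := by simpa using congrArg Prod.fst hp
  have hci : ci = cs[k] := by simpa using congrArg Prod.snd hp
  have hms : List.map Prod.snd (PySem.List.enumerate cs 0) = cs :=
    PySem.List.map_snd_enumerate cs 0
  have := cn_inner_gen (cnAdj graph ci) i ci (PySem.List.enumerate cs 0) PySem.Set.empty
    (by rw [hms]; exact hnd)
    (by intro q _; simp [PySem.Set.empty])
    (by
      intro q hq
      obtain ⟨k', hk', hq'⟩ := (PySem.List.mem_enumerate_iff cs 0 q).1 hq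
      subst hq'
      simp only [hi, hci]
      constructor
      · intro h
        have : k = k' := by omega
        subst this; rfl
      · intro h
        have : k' = k := (hnd.getElem_inj_iff).1 h
        omega)
  rw [this, hms]
  simp [PySem.Set.empty, cnExcl]

-- A's outer loop builds the association list of its keys in order
theorem cn_dict_gen (F : Int × String → PySem.Set String) :
    ∀ (l : List (Int × String)) (d : PySem.Dict String (PySem.Set String)),
      (l.map Prod.snd).Nodup → (∀ q ∈ l, d.contains q.2 = false) →
      (l.foldl (fun d p => d.insert p.2 (F p)) d).items = d.items ++ l.map (fun p => (p.2, F p))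
  | [], d, _, _ => by simp
  | q :: t, d, hnd, hd => by
    simp only [List.map_cons, List.nodup_cons] at hnd
    have hq : d.contains q.2 = false := hd q (by simp)
    have hins : (d.insert q.2 (F q)).items = d.items ++ [(q.2, F q)] := by
      simp [PySem.Dict.insert, hq]
    simp only [List.foldl_cons, List.map_cons]
    rw [cn_dict_gen F t (d.insert q.2 (F q)) hnd.2
      (fun p hp => by
        rw [PySem.Dict.contains_insert]
        have h1 : (p.2 == q.2) = false := by
          simp only [beq_eq_false_iff_ne, ne_eq]
          intro h
          exact hnd.1 (h ▸ List.mem_map_of_mem hp)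
        rw [h1, hd p (by simp [hp])]
        rfl), hins]
    simp

-- generic: a left fold of filters is one filter by the conjunction
theorem cn_filter_fold {α β : Type} (p : α → β → Bool) :
    ∀ (l : List α) (init : List β),
      l.foldl (fun r c => r.filter (p c)) init = init.filter (fun x => l.all (fun c => p c x))
  | [], init => by simp
  | c :: t, init => by
    simp only [List.foldl_cons, cn_filter_fold p t (init.filter (p c)), List.filter_filter]
    congr 1
    funext x
    simp [Bool.and_comm]

-- A's loop body as a filter predicate
def cnP (graph : List (String × List String)) (cs : List String) (M : Nat) (c x : String) : Bool :=
  if (cnExcl graph cs c).length = M then !(x == c) else !((cnExcl graph cs c).contains x)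

theorem cn_stepA (graph : List (String × List String)) (cs : List String) (M : Nat) :
    (fun (r : List String) c =>
      if (cnExcl graph cs c).length = M then PySem.Set.discard r c
      else PySem.Set.diff r (cnExcl graph cs c))
    = fun (r : List String) c => r.filter (cnP graph cs M c) := by
  funext r c
  unfold cnP
  by_cases h : (cnExcl graph cs c).length = M
  · simp only [if_pos h, PySem.Set.discard]
  · simp only [if_neg h, PySem.Set.diff, PySem.Set.contains]

-- the main equivalence
theorem cn_main (graph : List (String × List String)) (conn : String) :
    connected_neighbours graph conn = connected_neighbours_alt graph conn := by
  unfold connected_neighbours connected_neighbours_alt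
  set cs : List String := PySem.Set.ofList (cnAdj graph conn) with hcs
  have hnd : cs.Nodup := PySem.Set.nodup_ofList _
  -- characterize exclude_dict
  have hitems :
      ((PySem.List.enumerate cs).foldl
        (fun d p =>
          d.insert p.2
            ((PySem.List.enumerate cs).foldl
              (fun s q =>
                if p.1 = q.1 then s
                else if q.2 ∈ cnAdj graph p.2 then s
                else s.add q.2)
              PySem.Set.empty))
        PySem.Dict.empty).items = cs.map (fun c => (c, cnExcl graph cs c)) := by
    have hms : List.map Prod.snd (PySem.List.enumerate cs 0) = cs :=
      PySem.List.map_snd_enumerate cs 0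
    rw [cn_dict_gen _ (PySem.List.enumerate cs 0) PySem.Dict.empty
      (by rw [hms]; exact hnd)
      (by intro q _; rfl)]
    have : (PySem.List.enumerate cs 0).map
        (fun p => (p.2,
          (PySem.List.enumerate cs 0).foldl
            (fun s q => if p.1 = q.1 then s else if q.2 ∈ cnAdj graph p.2 then s else s.add q.2)
            PySem.Set.empty))
        = (PySem.List.enumerate cs 0).map (fun p => (p.2, cnExcl graph cs p.2)) := by
      apply List.map_congr_left
      intro p hp
      have := cn_inner_eq graph cs hnd p.1 p.2 (by simpa using hp)
      simp only [this]
    rw [this]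
    rw [show (fun (p : Int × String) => (p.2, cnExcl graph cs p.2))
        = ((fun c => (c, cnExcl graph cs c)) ∘ Prod.snd) from rfl,
      ← List.map_map, hms]
    simp [PySem.Dict.empty]
  simp only [PySem.Dict.values, hitems, List.map_map]
  rw [List.foldl_map, List.foldl_map, List.foldl_map]
  dsimp only [Function.comp]
  simp only [show ∀ y, List.filter (fun x => decide (x ≠ y ∧ x ∉ cnAdj graph y)) cs
      = cnExcl graph cs y from fun y => rfl]
  set M := List.foldl (fun x y => max x (cnExcl graph cs y).length) 0 cs with hM
  simp only [← hM]
  rw [cn_stepA graph cs M, cn_filter_fold]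
  simp only [List.filter_map, List.map_map]
  simp only [Function.comp_def]
  simp only [List.map_id']
  rw [List.filter_filter]
  rw [PySem.Set.ofList_eq_self_of_nodup _ (List.Nodup.filter _ hnd)]
  rw [show ∀ s : PySem.Set String, PySem.Set.union s [conn] = PySem.Set.add s conn from fun s => rfl]
  congr 1
  apply List.filter_congr
  intro x hx
  have hle : ∀ c ∈ cs, (cnExcl graph cs c).length ≤ M :=
    (PySem.List.le_foldl_max_nat cs (fun c => (cnExcl graph cs c).length) 0).2
  have hmemE : ∀ c y : String, y ∈ cnExcl graph cs c ↔ y ∈ cs ∧ y ≠ c ∧ y ∉ cnAdj graph c := by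
    intro c y; simp [cnExcl, List.mem_filter]
  rw [Bool.eq_iff_iff]
  simp only [List.all_eq_true, List.mem_filter, decide_eq_true_eq, Bool.and_eq_true, cnP]
  constructor
  · intro h
    have hxlt : (cnExcl graph cs x).length < M := by
      by_cases hm : (cnExcl graph cs x).length = M
      · have := h x hx
        rw [if_pos hm] at this
        simp at this
      · exact lt_of_le_of_ne (hle x hx) hm
    refine ⟨?_, hxlt⟩
    intro c hc
    obtain ⟨⟨hcs', hclt⟩, hcx⟩ := hc
    have hthis := h c hcs'
    rw [if_neg (Nat.ne_of_lt hclt)] at hthis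
    simp only [Bool.not_eq_true'] at hthis
    have hnotE : x ∉ cnExcl graph cs c := by
      intro hmem
      simp only [List.contains_eq_mem, decide_eq_false_iff_not] at hthis
      exact hthis hmem
    by_contra hnadj
    exact hnotE ((hmemE c x).2 ⟨hx, fun he => hcx he.symm, hnadj⟩)
  · rintro ⟨hall, hxlt⟩
    intro c hc
    by_cases hm : (cnExcl graph cs c).length = M
    · rw [if_pos hm]
      simp only [Bool.not_eq_eq_eq_not, Bool.not_true, beq_eq_false_iff_ne, ne_eq]
      intro hxc
      subst hxc
      exact absurd hm (Nat.ne_of_lt hxlt)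
    · rw [if_neg hm]
      have hclt : (cnExcl graph cs c).length < M := lt_of_le_of_ne (hle c hc) hm
      simp only [Bool.not_eq_eq_eq_not, Bool.not_true]
      simp only [List.contains_eq_mem, decide_eq_false_iff_not]
      intro hmem
      obtain ⟨-, hxc, hnadj⟩ := (hmemE c x).1 hmem
      exact hnadj (hall c ⟨⟨hc, hclt⟩, fun he => hxc he.symm⟩)

-- ===== VERDICT (by name: the statement is the Claim_ definition above) =====
theorem connected_neighbours_spec : Claim_equal_connected_neighbours := by
  intro graph conn _ _
  exact cn_main graph conn
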